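-- pv_equiv track=rewrite | github.com/christophersonanna/PCA_single_detector | src/PCA_single_detector/ya_run_script_disctance.py | splitting_radius
-- ===== SOURCE A (Python) =====
-- def splitting_radius(data, rad):
--     core = []
--     r1 = []
--     r2 = []
--     r3 = []
--     r4 = []
--     r5 = []
--     for i in range(0,len(rad)):
--         if rad[i]==0:
--             core.append(data[i])
--         elif rad[i]==1:
--             r1.append(data[i])
--         elif rad[i]==2:
--             r2.append(data[i])
--         elif rad[i]==3:
--             r3.append(data[i])
--         elif rad[i]==4:
--             r4.append(data[i])
--         else:
--             r5.append(data[i])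
--     return core, r1, r2, r3, r4, r5
-- ===== SOURCE B (Python) =====
-- def splitting_radius(data, rad):
--     pairs = list(zip(data, rad))
--     core, r1, r2, r3, r4 = ([d for d, r in pairs if r == k] for k in range(5))
--     r5 = [d for d, r in pairs if r < 0 or r > 4]
--     return core, r1, r2, r3, r4, r5
-- ===== Notes on version B (the rewrite author's own statement) =====
-- stated objective: simpler
-- what changed: Replaces the indexed loop with an if-elif cascade and six mutable accumulators by six declarative filter comprehensions over zip(data, rad).
-- outside the precondition, e.g. on splitting_radius([], [1]): A raises IndexError, B returns ([], [], [], [], [], [])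
import Mathlib
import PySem

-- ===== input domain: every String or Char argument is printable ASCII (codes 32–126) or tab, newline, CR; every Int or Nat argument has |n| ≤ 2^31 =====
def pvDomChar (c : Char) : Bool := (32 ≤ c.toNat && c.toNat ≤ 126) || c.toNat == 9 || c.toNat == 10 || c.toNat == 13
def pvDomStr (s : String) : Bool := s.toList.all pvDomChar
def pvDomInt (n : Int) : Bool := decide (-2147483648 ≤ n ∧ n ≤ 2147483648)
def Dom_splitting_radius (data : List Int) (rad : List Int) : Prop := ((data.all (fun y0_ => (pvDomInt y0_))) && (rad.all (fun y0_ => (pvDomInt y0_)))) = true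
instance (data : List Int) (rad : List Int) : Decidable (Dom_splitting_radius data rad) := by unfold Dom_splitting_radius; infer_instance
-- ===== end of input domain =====

-- B replaces A's indexed loop with an if-elif cascade and six accumulators by six
-- declarative filters over the zipped pairs (objective: simpler).


-- ===== PORT A =====
-- the loop body of A; pyGetD's default 0 is only reached outside Pre_ (Python raises IndexError there)
def splitA (data rad : List Int)
    (st : List Int × List Int × List Int × List Int × List Int × List Int) (i : Int) :
    List Int × List Int × List Int × List Int × List Int × List Int :=
  let r := PySem.List.pyGetD rad i 0
  let d := PySem.List.pyGetD data i 0
  let (core, r1, r2, r3, r4, r5) := st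
  if r = 0 then (core ++ [d], r1, r2, r3, r4, r5)
  else if r = 1 then (core, r1 ++ [d], r2, r3, r4, r5)
  else if r = 2 then (core, r1, r2 ++ [d], r3, r4, r5)
  else if r = 3 then (core, r1, r2, r3 ++ [d], r4, r5)
  else if r = 4 then (core, r1, r2, r3, r4 ++ [d], r5)
  else (core, r1, r2, r3, r4, r5 ++ [d])

def splitting_radius (data : List Int) (rad : List Int) :
    List Int × List Int × List Int × List Int × List Int × List Int :=
  (PySem.List.pyRange 0 rad.length 1).foldl (splitA data rad) ([], [], [], [], [], [])

-- ===== PORT B =====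
def splitting_radius_alt (data : List Int) (rad : List Int) :
    List Int × List Int × List Int × List Int × List Int × List Int :=
  let pairs := data.zip rad
  (pairs.filterMap (fun p => if p.2 = 0 then some p.1 else none),
   pairs.filterMap (fun p => if p.2 = 1 then some p.1 else none),
   pairs.filterMap (fun p => if p.2 = 2 then some p.1 else none),
   pairs.filterMap (fun p => if p.2 = 3 then some p.1 else none),
   pairs.filterMap (fun p => if p.2 = 4 then some p.1 else none),
   pairs.filterMap (fun p => if p.2 < 0 ∨ p.2 > 4 then some p.1 else none))

-- ===== PRECONDITION & SPEC =====
-- A indexes data[i] for every i < len(rad): it raises IndexError when len(data) < len(rad)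
def Pre_splitting_radius (data : List Int) (rad : List Int) : Prop := rad.length ≤ data.length
instance (data : List Int) (rad : List Int) : Decidable (Pre_splitting_radius data rad) := by
  unfold Pre_splitting_radius; infer_instance

def pvWitness_splitting_radius : List Int × List Int := ([3, 7, -2, 5], [0, 4, 9, 1])

def Spec_splitting_radius (data : List Int) (rad : List Int)
    (out : List Int × List Int × List Int × List Int × List Int × List Int) : Prop :=
  out = splitting_radius_alt data rad
instance (data : List Int) (rad : List Int) (out : List Int × List Int × List Int × List Int × List Int × List Int) : Decidable (Spec_splitting_radius data rad out) := by unfold Spec_splitting_radius; infer_instance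

-- ===== CLAIM (what is proved, stated in full; the proofs are below) =====
def Claim_equal_splitting_radius : Prop := ∀ (data : List Int) (rad : List Int), Dom_splitting_radius data rad → Pre_splitting_radius data rad → Spec_splitting_radius data rad (splitting_radius data rad)

-- ===== LEMMAS AND PROOFS =====

def fK (k : Int) (ps : List (Int × Int)) : List Int :=
  ps.filterMap (fun p => if p.2 = k then some p.1 else none)

def fElse (ps : List (Int × Int)) : List Int :=
  ps.filterMap (fun p => if p.2 < 0 ∨ p.2 > 4 then some p.1 else none)

theorem split_invariant (data rad : List Int) (h : rad.length ≤ data.length) :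
    ∀ (n : Nat), n ≤ rad.length →
    ∀ (c0 c1 c2 c3 c4 c5 : List Int),
    (PySem.List.pyRange 0 n 1).foldl (splitA data rad) (c0, c1, c2, c3, c4, c5) =
      (c0 ++ fK 0 ((data.zip rad).take n), c1 ++ fK 1 ((data.zip rad).take n),
       c2 ++ fK 2 ((data.zip rad).take n), c3 ++ fK 3 ((data.zip rad).take n),
       c4 ++ fK 4 ((data.zip rad).take n), c5 ++ fElse ((data.zip rad).take n)) := by
  intro n
  induction n with
  | zero =>
    intro _ c0 c1 c2 c3 c4 c5
    simp [fK, fElse]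
  | succ n ih =>
    intro hn c0 c1 c2 c3 c4 c5
    have hn' : n < rad.length := hn
    have hnd : n < data.length := lt_of_lt_of_le hn' h
    have hz : n < (data.zip rad).length := by
      simp [List.length_zip]; omega
    have hsplit : PySem.List.pyRange 0 ((n : Nat) + 1 : Nat) 1 =
        PySem.List.pyRange 0 (n : Nat) 1 ++ [(n : Int)] := by
      have := PySem.List.pyRange_one_succ_right (a := 0) (b := (n : Int)) (by positivity)
      simpa using this
    have htake : (data.zip rad).take (n + 1) =
        (data.zip rad).take n ++ [(data[n]'hnd, rad[n]'hn')] := by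
      rw [List.take_add_one]
      simp [List.getElem?_eq_getElem hz]
    rw [hsplit, List.foldl_append, ih (le_of_lt hn'), htake]
    simp only [List.foldl_cons, List.foldl_nil, splitA, fK, fElse, List.filterMap_append,
      List.filterMap_cons, List.filterMap_nil]
    have hr : PySem.List.pyGetD rad (n : Int) 0 = rad[n]'hn' := by
      simp [PySem.List.pyGetD_natCast, List.getD_eq_getElem?_getD, List.getElem?_eq_getElem hn']
    have hd : PySem.List.pyGetD data (n : Int) 0 = data[n]'hnd := by
      simp [PySem.List.pyGetD_natCast, List.getD_eq_getElem?_getD, List.getElem?_eq_getElem hnd]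
    rw [hr, hd]
    by_cases h0 : rad[n]'hn' = 0
    · simp [h0]
    by_cases h1 : rad[n]'hn' = 1
    · simp [h1]
    by_cases h2 : rad[n]'hn' = 2
    · simp [h2]
    by_cases h3 : rad[n]'hn' = 3
    · simp [h3]
    by_cases h4 : rad[n]'hn' = 4
    · simp [h4]
    · have h5 : rad[n]'hn' < 0 ∨ rad[n]'hn' > 4 := by omega
      simp [h0, h1, h2, h3, h4, h5]

-- ===== VERDICT (by name: the statement is the Claim_ definition above) =====
theorem splitting_radius_spec : Claim_equal_splitting_radius := by
  intro data rad _ hpre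
  unfold Spec_splitting_radius splitting_radius splitting_radius_alt
  have htake : (data.zip rad).take rad.length = data.zip rad := by
    apply List.take_of_length_le
    simp only [List.length_zip]; omega
  rw [split_invariant data rad hpre rad.length le_rfl]
  simp [htake, fK, fElse]
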